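-- pv_equiv track=rewrite | github.com/pypi-data/pypi-mirror-141 | packages/ls2-test/ls2_test-1.0.35.tar.gz/ls2_test-1.0.35/spotii/test_handler/20211001_alg.py | filt_width_no_std
-- ===== SOURCE A (Python) =====
-- def filt_width_no_std(original_list, number):
--     sort_list=original_list.copy()
--     sort_list.sort()
--
--
--     average = sort_list[number-1]
--     maxim=sort_list[-1]
--     rtn_list = []
--     for each in original_list:
--         if each>average:
--             rtn_list.append(maxim)
--         else:
--             rtn_list.append(average)
--     return rtn_list
-- ===== SOURCE B (Python) =====
-- def _quickselect(lst, i):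
--     # i-th smallest (0-based) of non-empty lst, expected O(len(lst))
--     p = lst[len(lst) // 2]
--     lt = [x for x in lst if x < p]
--     if i < len(lt):
--         return _quickselect(lt, i)
--     eqc = sum(1 for x in lst if x == p)
--     if i < len(lt) + eqc:
--         return p
--     return _quickselect([x for x in lst if x > p], i - len(lt) - eqc)
--
--
-- def filt_width_no_std(original_list, number):
--     n = len(original_list)
--     i = number - 1
--     if i < 0:
--         i += n
--     if not (0 <= i < n):
--         raise IndexError("list index out of range")
--     avg = _quickselect(original_list, i)
--     mx = original_list[0]
--     for x in original_list:
--         if x > mx: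
--             mx = x
--     return [mx if x > avg else avg for x in original_list]
-- ===== Notes on version B (the rewrite author's own statement) =====
-- stated objective: alternative
-- what changed: B replaces the full sort by a three-way quickselect (middle-element pivot) for the kth-smallest value plus a single running-max scan and one mapping pass, instead of sorting and indexing the sorted copy.
import Mathlib
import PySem

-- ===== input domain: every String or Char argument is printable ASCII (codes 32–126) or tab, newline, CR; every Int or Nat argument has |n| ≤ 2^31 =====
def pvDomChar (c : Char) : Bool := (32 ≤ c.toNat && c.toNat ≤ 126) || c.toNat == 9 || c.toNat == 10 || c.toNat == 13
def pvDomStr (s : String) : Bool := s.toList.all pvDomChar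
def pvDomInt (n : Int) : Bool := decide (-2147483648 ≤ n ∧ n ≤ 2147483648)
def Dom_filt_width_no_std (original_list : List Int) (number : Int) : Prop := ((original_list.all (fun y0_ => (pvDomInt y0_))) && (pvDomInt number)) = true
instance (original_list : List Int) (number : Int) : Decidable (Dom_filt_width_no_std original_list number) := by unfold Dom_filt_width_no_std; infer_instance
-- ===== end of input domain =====

-- B replaces the full sort by a three-way quickselect for the kth-smallest plus a running-max
-- scan and a single mapping pass (alternative algorithm; a timing run did not consistently confirm a speed-up).

-- ===== PORT A =====
def filt_width_no_std (original_list : List Int) (number : Int) : List Int :=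
  let sort_list := PySem.List.sorted original_list (fun x => x) false
  match PySem.List.pyGet? sort_list (number - 1), PySem.List.pyGet? sort_list (-1) with
  | some average, some maxim =>
      original_list.foldl (fun rtn_list each =>
        if average < each then rtn_list ++ [maxim] else rtn_list ++ [average]) []
  | _, _ => []   -- Python raises IndexError here; excluded by Pre_

-- ===== PORT B =====
-- i-th smallest (0-based) of lst; pivot = middle element, three-way partition (Source B `_quickselect`)
def quickselect (lst : List Int) (i : Int) : Int :=
  match lst with
  | [] => 0   -- unreachable on admitted inputs: the Python helper raises IndexError on []
  | a :: t =>
    let p := (a :: t)[(a :: t).length / 2]'(Nat.div_lt_self (Nat.succ_pos _) (by omega))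
    let lt := (a :: t).filter (fun x => decide (x < p))
    if i < (lt.length : Int) then quickselect lt i
    else
      let eqc := (a :: t).countP (fun x => x == p)
      if i < (lt.length : Int) + (eqc : Int) then p
      else quickselect ((a :: t).filter (fun x => decide (p < x))) (i - lt.length - eqc)
termination_by lst.length
decreasing_by
  · exact List.length_filter_lt_length_iff_exists.mpr
      ⟨(a :: t)[(a :: t).length / 2]'(Nat.div_lt_self (Nat.succ_pos _) (by omega)),
       List.getElem_mem _, by simp⟩
  · exact List.length_filter_lt_length_iff_exists.mpr
      ⟨(a :: t)[(a :: t).length / 2]'(Nat.div_lt_self (Nat.succ_pos _) (by omega)),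
       List.getElem_mem _, by simp⟩

def filt_width_no_std_alt (original_list : List Int) (number : Int) : List Int :=
  let n : Int := original_list.length
  let i0 := number - 1
  let i := if i0 < 0 then i0 + n else i0
  if 0 ≤ i ∧ i < n then
    let avg := quickselect original_list i
    let mx := original_list.foldl (fun mx x => if mx < x then x else mx) (original_list.headD 0)
    original_list.map (fun x => if avg < x then mx else avg)
  else []   -- Python raises IndexError here; excluded by Pre_

-- ===== PRECONDITION & SPEC =====
-- Pre_ excludes exactly the inputs where Python A raises IndexError: number-1 must be a valid
-- Python index into the list (in particular the list is non-empty).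
def Pre_filt_width_no_std (original_list : List Int) (number : Int) : Prop :=
  -(original_list.length : Int) ≤ number - 1 ∧ number - 1 < (original_list.length : Int)
instance (original_list : List Int) (number : Int) : Decidable (Pre_filt_width_no_std original_list number) := by unfold Pre_filt_width_no_std; infer_instance

def pvWitness_filt_width_no_std : List Int × Int := ([3, 1, 2, 5, 4], 3)

def Spec_filt_width_no_std (original_list : List Int) (number : Int) (out : List Int) : Prop := out = filt_width_no_std_alt original_list number
instance (original_list : List Int) (number : Int) (out : List Int) : Decidable (Spec_filt_width_no_std original_list number out) := by unfold Spec_filt_width_no_std; infer_instance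

-- ===== CLAIM (what is proved, stated in full; the proofs are below) =====
def Claim_equal_filt_width_no_std : Prop := ∀ (original_list : List Int) (number : Int), Dom_filt_width_no_std original_list number → Pre_filt_width_no_std original_list number → Spec_filt_width_no_std original_list number (filt_width_no_std original_list number)

-- ===== LEMMAS AND PROOFS =====

-- the last element of a ≤-pairwise list bounds every member
lemma pairwise_le_getLast? (l : List Int) (hp : l.Pairwise (· ≤ ·)) (m : Int)
    (hm : l.getLast? = some m) : ∀ x ∈ l, x ≤ m := by
  induction l with
  | nil => simp at hm
  | cons a t ih =>
    intro x hx
    cases t with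
    | nil =>
      simp at hm hx; omega
    | cons b t' =>
      have hm' : (b :: t').getLast? = some m := by simpa using hm
      have hp' := List.pairwise_cons.mp hp
      rcases List.mem_cons.mp hx with rfl | hx'
      · exact hp'.1 m (List.mem_of_getLast? hm')
      · exact ih hp'.2 hm' x hx'

-- sorted(l) decomposes around any pivot p into sorted(<p) ++ (=p) ++ sorted(>p)
lemma sorted_three_way (l : List Int) (p : Int) :
    PySem.List.sorted l (fun x => x) false
      = PySem.List.sorted (l.filter (fun x => decide (x < p))) (fun x => x) false
        ++ l.filter (fun x => x == p)
        ++ PySem.List.sorted (l.filter (fun x => decide (p < x))) (fun x => x) false := by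
  apply PySem.List.sorted_id_eq_of_perm_of_pairwise
  · -- permutation
    have h1 : (PySem.List.sorted (l.filter (fun x => decide (x < p))) (fun x => x) false
        ++ l.filter (fun x => x == p)
        ++ PySem.List.sorted (l.filter (fun x => decide (p < x))) (fun x => x) false).Perm
        (l.filter (fun x => decide (x < p)) ++ (l.filter (fun x => x == p)
          ++ l.filter (fun x => decide (p < x)))) := by
      refine (((PySem.List.sorted_perm (l.filter (fun x => decide (x < p))) (fun x => x) false).append
        (List.Perm.refl (l.filter (fun x => x == p)))).append
        (PySem.List.sorted_perm (l.filter (fun x => decide (p < x))) (fun x => x) false)).trans ?_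
      rw [List.append_assoc]
    refine h1.trans ?_
    have hmid : (l.filter (fun x => x == p) ++ l.filter (fun x => decide (p < x))).Perm
        (l.filter (fun x => !decide (x < p))) := by
      have hsplit := List.filter_append_perm (fun x => x == p) (l.filter (fun x => !decide (x < p)))
      have e1 : (l.filter (fun x => !decide (x < p))).filter (fun x => x == p)
          = l.filter (fun x => x == p) := by
        rw [List.filter_filter]
        refine List.filter_congr ?_
        intro x _
        by_cases hx : x = p
        · subst hx; simp
        · simp [hx]
      have e2 : (l.filter (fun x => !decide (x < p))).filter (fun x => !(x == p))
          = l.filter (fun x => decide (p < x)) := by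
        rw [List.filter_filter]
        refine List.filter_congr ?_
        intro x _
        by_cases hx : x = p
        · subst hx; simp
        · by_cases hlt : x < p
          · simp [hlt, show ¬ p < x by omega]
          · simp [hx, hlt, show p < x by omega]
      rw [e1, e2] at hsplit
      exact hsplit
    refine ((List.Perm.refl _).append hmid).trans ?_
    exact List.filter_append_perm (fun x => decide (x < p)) l
  · -- pairwise ≤
    rw [List.append_assoc, List.pairwise_append]
    refine ⟨by simpa using PySem.List.sorted_pairwise (l.filter (fun x => decide (x < p))) (fun x => x), ?_, ?_⟩
    · rw [List.pairwise_append]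
      refine ⟨?_, by simpa using PySem.List.sorted_pairwise (l.filter (fun x => decide (p < x))) (fun x => x), ?_⟩
      · refine List.pairwise_of_forall_mem_list ?_
        intro a ha b hb
        have ha' := (List.mem_filter.mp ha).2
        have hb' := (List.mem_filter.mp hb).2
        simp at ha' hb'; omega
      · intro a ha b hb
        have ha' := (List.mem_filter.mp ha).2
        have hb' := (List.mem_filter.mp ((PySem.List.mem_sorted _ _ _ b).mp hb)).2
        simp at ha' hb'; omega
    · intro a ha b hb
      have ha' := (List.mem_filter.mp ((PySem.List.mem_sorted _ _ _ a).mp ha)).2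
      rcases List.mem_append.mp hb with hb | hb
      · have hb' := (List.mem_filter.mp hb).2
        simp at ha' hb'; omega
      · have hb' := (List.mem_filter.mp ((PySem.List.mem_sorted _ _ _ b).mp hb)).2
        simp at ha' hb'; omega

-- quickselect computes sorted(l)[i]
lemma qsel_sorted : ∀ (n : Nat) (l : List Int), l.length ≤ n → ∀ (i : Int), 0 ≤ i →
    i < (l.length : Int) →
    ∀ (hk : i.toNat < (PySem.List.sorted l (fun x => x) false).length),
    quickselect l i = (PySem.List.sorted l (fun x => x) false)[i.toNat] := by
  intro n
  induction n with
  | zero =>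
    intro l hl i h0 h1 hk
    omega
  | succ n ih =>
    intro l hl i h0 h1 hk
    match l with
    | [] => simp at h1; omega
    | a :: t =>
      rw [quickselect]
      set p := (a :: t)[(a :: t).length / 2]'(Nat.div_lt_self (Nat.succ_pos _) (by omega)) with hp
      set lt := (a :: t).filter (fun x => decide (x < p)) with hlt
      set eq := (a :: t).filter (fun x => x == p) with heq
      set gt := (a :: t).filter (fun x => decide (p < x)) with hgt
      have hdecomp := sorted_three_way (a :: t) p
      rw [← hlt, ← heq, ← hgt] at hdecomp
      have hltlen : lt.length < (a :: t).length :=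
        List.length_filter_lt_length_iff_exists.mpr ⟨p, List.getElem_mem _, by simp⟩
      have hgtlen : gt.length < (a :: t).length :=
        List.length_filter_lt_length_iff_exists.mpr ⟨p, List.getElem_mem _, by simp⟩
      have hslt := PySem.List.length_sorted lt (fun x : Int => x) false
      have hsgt := PySem.List.length_sorted gt (fun x : Int => x) false
      have hsl := PySem.List.length_sorted (a :: t) (fun x : Int => x) false
      have heqc : (a :: t).countP (fun x => x == p) = eq.length := by
        rw [heq]; exact List.countP_eq_length_filter
      have hlensum : lt.length + eq.length + gt.length = (a :: t).length := by
        have hc := congrArg List.length hdecomp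
        simp only [List.length_append, hslt, hsgt, hsl] at hc
        omega
      split_ifs with c1
      · -- i < |lt| : recurse left
        have hk' : i.toNat < (PySem.List.sorted lt (fun x => x) false).length := by
          rw [hslt]; omega
        rw [ih lt (by omega) i h0 (by omega) hk']
        simp only [hdecomp]
        rw [List.getElem_append_left (by simp only [List.length_append, hslt]; omega),
            List.getElem_append_left (by omega)]
      · change (if i < (lt.length : Int) + (List.countP (fun x => x == p) (a :: t) : Int) then p
            else quickselect gt (i - (lt.length : Int) - (List.countP (fun x => x == p) (a :: t) : Int))) = _
        rw [heqc]
        split_ifs with c2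
        · -- middle: result is p
          simp only [hdecomp]
          have hkk : i.toNat < ((PySem.List.sorted lt (fun x => x) false) ++ eq).length := by
            simp only [List.length_append, hslt]; omega
          rw [List.getElem_append_left hkk, List.getElem_append_right (by rw [hslt]; omega)]
          have hlt2 : i.toNat - (PySem.List.sorted lt (fun x => x) false).length < eq.length := by
            rw [hslt]; omega
          have hall : ∀ x ∈ eq, x = p := by
            intro x hx
            rw [heq] at hx
            simpa using (List.mem_filter.mp hx).2
          exact (hall _ (List.getElem_mem hlt2)).symm
        · -- right: recurse on gt
          have h0' : (0 : Int) ≤ i - lt.length - eq.length := by omega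
          have h1' : i - lt.length - eq.length < (gt.length : Int) := by
            have : i < ((a :: t).length : Int) := h1
            push_cast at this ⊢
            omega
          have hk' : (i - lt.length - eq.length).toNat
              < (PySem.List.sorted gt (fun x => x) false).length := by
            rw [hsgt]; omega
          rw [ih gt (by omega) _ h0' h1' hk']
          simp only [hdecomp]
          have hge : ((PySem.List.sorted lt (fun x => x) false) ++ eq).length ≤ i.toNat := by
            simp only [List.length_append, hslt]; omega
          rw [List.getElem_append_right hge]
          congr 1
          simp only [List.length_append, hslt]
          omega

-- ===== VERDICT (by name: the statement is the Claim_ definition above) =====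
theorem filt_width_no_std_spec : Claim_equal_filt_width_no_std := by
  intro l number hdom hpre
  obtain ⟨h1, h2⟩ := hpre
  have hlen : 0 < l.length := by omega
  have hlne : l ≠ [] := by cases l <;> simp_all
  set s := PySem.List.sorted l (fun x => x) false with hs
  have hslen : s.length = l.length := PySem.List.length_sorted _ _ _
  have hsne : s ≠ [] := by
    intro h; rw [h] at hslen; simp at hslen; omega
  set i0 : Int := number - 1 with hi0
  set i : Int := if i0 < 0 then i0 + (l.length : Int) else i0 with hi
  have hibnd : 0 ≤ i ∧ i < (l.length : Int) := by
    rw [hi]; split_ifs <;> omega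
  have hk : i.toNat < s.length := by omega
  -- A's average = s[i.toNat]
  have hA : PySem.List.pyGet? s i0 = some (s[i.toNat]'hk) := by
    by_cases hneg : i0 < 0
    · have hn0 : ¬ (0 : Int) ≤ i0 := by omega
      have hidx : s.length - (-i0).toNat = i.toNat := by
        rw [hi, if_pos (by omega : i0 < 0)]; omega
      simp only [PySem.List.pyGet?, PySem.List.pyIdx?, hn0, if_false,
        if_pos (show -(s.length : Int) ≤ i0 by omega), Option.bind_some]
      rw [hidx, List.getElem?_eq_getElem hk]
    · have hn0 : (0 : Int) ≤ i0 := by omega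
      simp only [PySem.List.pyGet?, PySem.List.pyIdx?, if_pos hn0, if_pos (by omega : i0 < (s.length : Int))]
      simp only [Option.bind_some]
      rw [List.getElem?_eq_getElem (by omega)]
      congr 2
      rw [hi, if_neg hneg]
  -- A's maxim = last of s
  have hM : PySem.List.pyGet? s (-1) = some (s.getLast hsne) := by
    rw [PySem.List.pyGet?_neg_one, List.getLast?_eq_some_getLast hsne]
  -- maxim is the maximum of l
  have hmaxmem : s.getLast hsne ∈ l := by
    rw [← PySem.List.mem_sorted l (fun x => x) false]
    exact List.getLast_mem hsne
  have hmaxub : ∀ x ∈ l, x ≤ s.getLast hsne := by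
    intro x hx
    refine pairwise_le_getLast? s ?_ _ (List.getLast?_eq_some_getLast hsne) x
      ((PySem.List.mem_sorted l (fun x => x) false x).mpr hx)
    simpa using PySem.List.sorted_pairwise l (fun x : Int => x)
  -- B's running max equals maxim
  have hfoldeq : ∀ (a : Int) (t : List Int),
      (a :: t).foldl (fun mx x => if mx < x then x else mx) a = t.foldl max a := by
    intro a t
    have : (fun (mx x : Int) => if mx < x then x else mx) = (fun mx x => max mx x) := by
      funext u v; exact (max_def_lt u v).symm
    rw [this]; simp [List.foldl_cons]
  have hmx : l.foldl (fun mx x => if mx < x then x else mx) (l.headD 0) = s.getLast hsne := by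
    match l, hlne with
    | a :: t, _ =>
      rw [List.headD_cons, hfoldeq]
      apply le_antisymm
      · rcases PySem.List.foldl_max_mem t a with h | h
        · rw [h]; exact hmaxub a List.mem_cons_self
        · exact hmaxub _ (List.mem_cons_of_mem a h)
      · rcases List.mem_cons.mp hmaxmem with h | h
        · rw [h]; exact (PySem.List.le_foldl_max t a).1
        · exact (PySem.List.le_foldl_max t a).2 _ h
  -- B's quickselect equals s[i.toNat]
  have havg : quickselect l i = s[i.toNat]'hk :=
    qsel_sorted l.length l (le_refl _) i hibnd.1 hibnd.2 hk
  -- put it together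
  unfold Spec_filt_width_no_std filt_width_no_std filt_width_no_std_alt
  simp only [← hs, ← hi0]
  rw [hA, hM]
  rw [if_pos (by rw [← hi] at *; exact hibnd)]
  simp only [← hi, havg, hmx]
  have hloop : ∀ (avg mx : Int),
      l.foldl (fun r e => if avg < e then r ++ [mx] else r ++ [avg]) []
        = l.map (fun e => if avg < e then mx else avg) := by
    intro avg mx
    have : (fun (r : List Int) (e : Int) => if avg < e then r ++ [mx] else r ++ [avg])
        = (fun r e => r ++ [if avg < e then mx else avg]) := by
      funext r e; split_ifs <;> rfl
    rw [this, PySem.List.foldl_append_singleton_eq_map]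
    simp
  rw [hloop]
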